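-- pv_equiv track=rewrite | github.com/studentdotai/Nautical-Graph-Toolkit | SourceCode/MARITIME_MODULE.py | name_list_to_bands
-- ===== SOURCE A (Python) =====
-- def name_list_to_bands(name_list: list) -> dict[str, list]:
-- 	"""
-- 	Sefregate ENC_NAME list to appropriate Usage bands
--
-- 	Usage Bands:
-- 	1: Overview
-- 	2: General
-- 	3: Coastal
-- 	4: Approach
-- 	5: Harbour
-- 	6: Berthing
-- 	"""
--
-- 	if name_list:
-- 		usage_bands = {
-- 			'Overview': [], 'General': [], 'Coastal': [],
-- 			'Approach': [], 'Harbour': [], 'Berthing': []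
-- 		}
--
-- 		for enc in name_list:
-- 			usage_band = enc[2]  # Get usage band from ENC name
-- 			if usage_band == '1':
-- 				usage_bands['Overview'].append(enc)
-- 			elif usage_band == '2':
-- 				usage_bands['General'].append(enc)
-- 			elif usage_band == '3':
-- 				usage_bands['Coastal'].append(enc)
-- 			elif usage_band == '4':
-- 				usage_bands['Approach'].append(enc)
-- 			elif usage_band == '5':
-- 				usage_bands['Harbour'].append(enc)
-- 			elif usage_band == '6':
-- 				usage_bands['Berthing'].append(enc)
--
-- 		return {k: v for k, v in usage_bands.items() if v}  # Return only non-empty bands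
-- ===== SOURCE B (Python) =====
-- def name_list_to_bands(name_list: list) -> dict[str, list]:
--     if name_list:
--         mapping = {'1': 'Overview', '2': 'General', '3': 'Coastal',
--                    '4': 'Approach', '5': 'Harbour', '6': 'Berthing'}
--         bands = {name: [enc for enc in name_list if enc[2] == ch]
--                  for ch, name in mapping.items()}
--         return {k: v for k, v in bands.items() if v}
-- ===== Notes on version B (the rewrite author's own statement) =====
-- stated objective: idiomatic
-- what changed: Replaces the single dispatch loop that appends into a pre-built dict of six mutable lists with a dict comprehension that builds each band by one list-comprehension filter per band character, then drops empty bands.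
-- outside the precondition, e.g. on name_list_to_bands([]): A returns None, B returns None
import Mathlib
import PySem

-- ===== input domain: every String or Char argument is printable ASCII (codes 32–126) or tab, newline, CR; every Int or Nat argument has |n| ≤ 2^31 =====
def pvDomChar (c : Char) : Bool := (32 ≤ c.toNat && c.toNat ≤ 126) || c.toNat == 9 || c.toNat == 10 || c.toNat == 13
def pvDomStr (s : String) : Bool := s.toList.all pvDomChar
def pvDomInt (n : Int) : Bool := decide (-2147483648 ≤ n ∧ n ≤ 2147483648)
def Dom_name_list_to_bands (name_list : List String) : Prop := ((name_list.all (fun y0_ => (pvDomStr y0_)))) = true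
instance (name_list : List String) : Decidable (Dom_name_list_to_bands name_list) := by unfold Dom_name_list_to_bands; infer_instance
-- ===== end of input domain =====

-- B groups ENC names with one filter pass per band character instead of A's single
-- dispatch loop appending into a pre-built dict of six lists; objective: idiomatic.

-- ===== PORT A =====
-- the body of A's `for enc in name_list` loop: dispatch on enc[2] and append
def stepA (d : PySem.Dict String (List String)) (enc : String) : PySem.Dict String (List String) :=
  match PySem.Str.pyGet? enc 2 with
  | none => d  -- Python raises IndexError here; excluded by Pre_
  | some c =>
    if c = '1' then d.modify "Overview" [] (· ++ [enc])
    else if c = '2' then d.modify "General" [] (· ++ [enc])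
    else if c = '3' then d.modify "Coastal" [] (· ++ [enc])
    else if c = '4' then d.modify "Approach" [] (· ++ [enc])
    else if c = '5' then d.modify "Harbour" [] (· ++ [enc])
    else if c = '6' then d.modify "Berthing" [] (· ++ [enc])
    else d

def name_list_to_bands (name_list : List String) : List (String × List String) :=
  if name_list.isEmpty then []  -- Python returns None here; excluded by Pre_
  else
    let usage_bands : PySem.Dict String (List String) :=
      (((((PySem.Dict.empty.insert "Overview" []).insert "General" []).insert "Coastal"
        []).insert "Approach" []).insert "Harbour" []).insert "Berthing" []
    let final := name_list.foldl stepA usage_bands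
    final.items.filter (fun kv => !kv.2.isEmpty)

-- ===== PORT B =====
def bandMapping : List (Char × String) :=
  [('1', "Overview"), ('2', "General"), ('3', "Coastal"),
   ('4', "Approach"), ('5', "Harbour"), ('6', "Berthing")]

def name_list_to_bands_alt (name_list : List String) : List (String × List String) :=
  if name_list.isEmpty then []  -- Python returns None here; excluded by Pre_
  else
    let bands := bandMapping.map
      (fun p => (p.2, name_list.filter (fun enc => PySem.Str.pyGet? enc 2 == some p.1)))
    bands.filter (fun kv => !kv.2.isEmpty)

-- ===== PRECONDITION & SPEC =====
-- Pre_ excludes the empty list (A returns None, not a dict) and lists containing a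
-- string shorter than 3 characters (enc[2] raises IndexError in A and in B).
def Pre_name_list_to_bands (name_list : List String) : Prop :=
  name_list ≠ [] ∧ ∀ s ∈ name_list, 2 < s.toList.length
instance (name_list : List String) : Decidable (Pre_name_list_to_bands name_list) := by
  unfold Pre_name_list_to_bands; infer_instance

def pvWitness_name_list_to_bands : List String := ["US5NY1AB", "AA1ZZ"]

def Spec_name_list_to_bands (name_list : List String) (out : List (String × List String)) : Prop := out = name_list_to_bands_alt name_list
instance (name_list : List String) (out : List (String × List String)) : Decidable (Spec_name_list_to_bands name_list out) := by unfold Spec_name_list_to_bands; infer_instance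

-- ===== CLAIM (what is proved, stated in full; the proofs are below) =====
def Claim_equal_name_list_to_bands : Prop := ∀ (name_list : List String), Dom_name_list_to_bands name_list → Pre_name_list_to_bands name_list → Spec_name_list_to_bands name_list (name_list_to_bands name_list)

-- ===== LEMMAS AND PROOFS =====

-- a dict in the shape A's loop maintains: the six fixed keys with their current lists
def mkD (o g c a h b : List String) : PySem.Dict String (List String) :=
  PySem.Dict.mk [("Overview", o), ("General", g), ("Coastal", c),
                 ("Approach", a), ("Harbour", h), ("Berthing", b)]

-- B's per-band membership test, as a predicate on the band character
def pB (ch : Char) (enc : String) : Bool := PySem.Str.pyGet? enc 2 == some ch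

lemma mod1 (o g c a h b : List String) (x : String) :
    (mkD o g c a h b).modify "Overview" [] (· ++ [x]) = mkD (o ++ [x]) g c a h b := by rfl
lemma mod2 (o g c a h b : List String) (x : String) :
    (mkD o g c a h b).modify "General" [] (· ++ [x]) = mkD o (g ++ [x]) c a h b := by rfl
lemma mod3 (o g c a h b : List String) (x : String) :
    (mkD o g c a h b).modify "Coastal" [] (· ++ [x]) = mkD o g (c ++ [x]) a h b := by rfl
lemma mod4 (o g c a h b : List String) (x : String) :
    (mkD o g c a h b).modify "Approach" [] (· ++ [x]) = mkD o g c (a ++ [x]) h b := by rfl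
lemma mod5 (o g c a h b : List String) (x : String) :
    (mkD o g c a h b).modify "Harbour" [] (· ++ [x]) = mkD o g c a (h ++ [x]) b := by rfl
lemma mod6 (o g c a h b : List String) (x : String) :
    (mkD o g c a h b).modify "Berthing" [] (· ++ [x]) = mkD o g c a h (b ++ [x]) := by rfl

lemma loop_eq (xs : List String) (o g c a h b : List String) :
    xs.foldl stepA (mkD o g c a h b) =
      mkD (o ++ xs.filter (pB '1')) (g ++ xs.filter (pB '2')) (c ++ xs.filter (pB '3'))
          (a ++ xs.filter (pB '4')) (h ++ xs.filter (pB '5')) (b ++ xs.filter (pB '6')) := by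
  induction xs generalizing o g c a h b with
  | nil => simp
  | cons x xs ih =>
    rw [List.foldl_cons]
    cases hx : PySem.List.pyGet? x.toList 2 with
    | none =>
      rw [show stepA (mkD o g c a h b) x = mkD o g c a h b from by
        simp [stepA, PySem.Str.pyGet?, hx], ih]
      simp [pB, PySem.Str.pyGet?, hx]
    | some ch =>
      by_cases h1 : ch = '1'
      · subst h1
        rw [show stepA (mkD o g c a h b) x = mkD (o ++ [x]) g c a h b from by
          simp [stepA, PySem.Str.pyGet?, hx, mod1], ih]
        simp [pB, PySem.Str.pyGet?, hx, List.append_assoc]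
      by_cases h2 : ch = '2'
      · subst h2
        rw [show stepA (mkD o g c a h b) x = mkD o (g ++ [x]) c a h b from by
          simp [stepA, PySem.Str.pyGet?, hx, mod2], ih]
        simp [pB, PySem.Str.pyGet?, hx, List.append_assoc]
      by_cases h3 : ch = '3'
      · subst h3
        rw [show stepA (mkD o g c a h b) x = mkD o g (c ++ [x]) a h b from by
          simp [stepA, PySem.Str.pyGet?, hx, mod3], ih]
        simp [pB, PySem.Str.pyGet?, hx, List.append_assoc]
      by_cases h4 : ch = '4'
      · subst h4
        rw [show stepA (mkD o g c a h b) x = mkD o g c (a ++ [x]) h b from by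
          simp [stepA, PySem.Str.pyGet?, hx, mod4], ih]
        simp [pB, PySem.Str.pyGet?, hx, List.append_assoc]
      by_cases h5 : ch = '5'
      · subst h5
        rw [show stepA (mkD o g c a h b) x = mkD o g c a (h ++ [x]) b from by
          simp [stepA, PySem.Str.pyGet?, hx, mod5], ih]
        simp [pB, PySem.Str.pyGet?, hx, List.append_assoc]
      by_cases h6 : ch = '6'
      · subst h6
        rw [show stepA (mkD o g c a h b) x = mkD o g c a h (b ++ [x]) from by
          simp [stepA, PySem.Str.pyGet?, hx, mod6], ih]
        simp [pB, PySem.Str.pyGet?, hx, List.append_assoc]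
      · rw [show stepA (mkD o g c a h b) x = mkD o g c a h b from by
          simp [stepA, PySem.Str.pyGet?, hx, h1, h2, h3, h4, h5, h6], ih]
        simp [pB, PySem.Str.pyGet?, hx, h1, h2, h3, h4, h5, h6]

-- ===== VERDICT (by name: the statement is the Claim_ definition above) =====
theorem name_list_to_bands_spec : Claim_equal_name_list_to_bands := by
  intro xs _ hpre
  rcases hpre with ⟨hne, -⟩
  have hne' : xs.isEmpty = false := by simpa using hne
  simp only [Spec_name_list_to_bands, name_list_to_bands, name_list_to_bands_alt, hne',
    Bool.false_eq_true, if_false]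
  rw [show (((((PySem.Dict.empty.insert "Overview" ([] : List String)).insert "General"
      []).insert "Coastal" []).insert "Approach" []).insert "Harbour" []).insert "Berthing" []
      = mkD [] [] [] [] [] [] from rfl, loop_eq]
  simp only [mkD, bandMapping, List.map_cons, List.map_nil]
  rfl
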